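-- pv_equiv track=rewrite | github.com/tomo2515x/python1-2022 | src/algo/z9/solution.py | equalize_parity
-- ===== SOURCE A (Python) =====
-- def equalize_parity(a: list[int]) -> bool:
--     n = len(a)
--     c = [x % 2 for x in a]
--
--     if sum(c) == 0 or sum(c) == n:
--         return True
--
--     smallest = min(a)
--     if smallest % 2 == 1:
--         return True
--
--     return False
-- ===== SOURCE B (Python) =====
-- def equalize_parity(a: list[int]) -> bool:
--     has_odd = any(x % 2 != 0 for x in a)
--     has_even = any(x % 2 == 0 for x in a)
--     if not has_odd or not has_even:
--         return True
--     # mixed parities: answer is True iff some odd element lies strictly below every even element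
--     return any(x % 2 != 0 and all(x < y for y in a if y % 2 == 0) for x in a)
-- ===== Notes on version B (the rewrite author's own statement) =====
-- stated objective: alternative
-- what changed: A sums a parity map to detect uniform parity and then tests the parity of the global minimum; B never computes a sum or a minimum: it checks with any() whether both parities occur and, if so, asks whether some odd element is strictly below every even element (a quantifier formulation of 'the minimum is odd').
import Mathlib
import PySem

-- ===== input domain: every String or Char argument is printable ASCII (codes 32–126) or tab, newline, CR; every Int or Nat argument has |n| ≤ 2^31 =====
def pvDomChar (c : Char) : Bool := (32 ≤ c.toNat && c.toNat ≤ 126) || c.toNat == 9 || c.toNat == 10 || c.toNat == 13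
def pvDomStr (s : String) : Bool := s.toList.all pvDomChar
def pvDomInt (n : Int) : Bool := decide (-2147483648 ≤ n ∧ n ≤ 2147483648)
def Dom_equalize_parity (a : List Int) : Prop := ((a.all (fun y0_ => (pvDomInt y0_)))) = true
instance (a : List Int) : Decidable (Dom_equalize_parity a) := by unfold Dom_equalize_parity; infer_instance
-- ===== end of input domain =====

-- B drops A's parity-sum test and global minimum: it uses any/all quantifiers (do both parities occur? does some odd element lie strictly below every even one?); objective: alternative.


-- ===== PORT A =====
def equalize_parity (a : List Int) : Bool :=
  let n : Int := a.length
  let c := a.map (fun x => PySem.Int.mod x 2)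
  if c.sum = 0 ∨ c.sum = n then true
  else
    -- min(a): a is provably nonempty here (the empty list takes the sum-0 branch), so the none arm is unreachable
    match PySem.List.min? a (fun x => x) with
    | some smallest => if PySem.Int.mod smallest 2 = 1 then true else false
    | none => false

-- ===== PORT B =====
def equalize_parity_alt (a : List Int) : Bool :=
  let hasOdd := a.any (fun x => PySem.Int.mod x 2 ≠ 0)
  let hasEven := a.any (fun x => PySem.Int.mod x 2 = 0)
  if !hasOdd || !hasEven then true
  else a.any (fun x =>
    decide (PySem.Int.mod x 2 ≠ 0) &&
    a.all (fun y => !(decide (PySem.Int.mod y 2 = 0)) || decide (x < y)))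

-- ===== PRECONDITION & SPEC =====
def Spec_equalize_parity (a : List Int) (out : Bool) : Prop := out = equalize_parity_alt a
instance (a : List Int) (out : Bool) : Decidable (Spec_equalize_parity a out) := by unfold Spec_equalize_parity; infer_instance

-- ===== CLAIM (what is proved, stated in full; the proofs are below) =====
def Claim_equal_equalize_parity : Prop := ∀ (a : List Int), Dom_equalize_parity a → Spec_equalize_parity a (equalize_parity a)

-- ===== LEMMAS AND PROOFS =====

theorem pv_mod2_cases (x : Int) : PySem.Int.mod x 2 = 0 ∨ PySem.Int.mod x 2 = 1 := by
  have h0 := PySem.Int.mod_nonneg x (b := 2) (by omega)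
  have h1 := PySem.Int.mod_lt x (b := 2) (by omega)
  omega

theorem pv_sum_zero_iff (c : List Int) (h : ∀ x ∈ c, x = 0 ∨ x = 1) :
    c.sum = 0 ↔ ∀ x ∈ c, x = 0 := by
  induction c with
  | nil => simp
  | cons y t ih =>
    have hy := h y (by simp)
    have ht := ih (fun x hx => h x (by simp [hx]))
    have hnn : 0 ≤ t.sum := List.sum_nonneg (fun x hx => by rcases h x (by simp [hx]) with h' | h' <;> omega)
    simp only [List.sum_cons, List.mem_cons]
    constructor
    · intro hs
      have hts : t.sum = 0 := by omega
      intro x hx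
      rcases hx with rfl | hx
      · omega
      · exact ht.mp hts x hx
    · intro hall
      have : t.sum = 0 := ht.mpr (fun x hx => hall x (Or.inr hx))
      have := hall y (Or.inl rfl); omega

theorem pv_sum_le_len (c : List Int) (h : ∀ x ∈ c, x = 0 ∨ x = 1) :
    c.sum ≤ (c.length : Int) := by
  induction c with
  | nil => simp
  | cons y t ih =>
    have hy := h y (by simp)
    have := ih (fun x hx => h x (by simp [hx]))
    simp only [List.sum_cons, List.length_cons]
    push_cast; omega

theorem pv_sum_len_iff (c : List Int) (h : ∀ x ∈ c, x = 0 ∨ x = 1) :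
    c.sum = (c.length : Int) ↔ ∀ x ∈ c, x = 1 := by
  induction c with
  | nil => simp
  | cons y t ih =>
    have hy := h y (by simp)
    have ht := ih (fun x hx => h x (by simp [hx]))
    have hub : t.sum ≤ (t.length : Int) :=
      pv_sum_le_len t (fun x hx => h x (by simp [hx]))
    simp only [List.sum_cons, List.length_cons, List.mem_cons]
    push_cast
    constructor
    · intro hs
      have hts : t.sum = (t.length : Int) := by omega
      intro x hx
      rcases hx with rfl | hx
      · omega
      · exact ht.mp hts x hx
    · intro hall
      have : t.sum = (t.length : Int) := ht.mpr (fun x hx => hall x (Or.inr hx))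
      have := hall y (Or.inl rfl); omega

theorem equalize_parity_eq (a : List Int) : equalize_parity a = equalize_parity_alt a := by
  unfold equalize_parity equalize_parity_alt
  have hcases : ∀ x ∈ a.map (fun x => PySem.Int.mod x 2), x = 0 ∨ x = 1 := by
    intro x hx
    rcases List.mem_map.mp hx with ⟨y, _, rfl⟩
    exact pv_mod2_cases y
  by_cases hc : (a.map (fun x => PySem.Int.mod x 2)).sum = 0 ∨
      (a.map (fun x => PySem.Int.mod x 2)).sum = (a.length : Int)
  · -- A returns true; show B does too
    simp only [hc, if_true]
    rcases hc with h0 | h1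
    · -- all even: hasOdd is false
      have hall := (pv_sum_zero_iff _ hcases).mp h0
      have hno : a.any (fun x => decide (PySem.Int.mod x 2 ≠ 0)) = false := by
        simp only [List.any_eq_false, decide_eq_true_eq]
        intro x hx
        simpa using hall _ (List.mem_map.mpr ⟨x, hx, rfl⟩)
      rw [hno]; simp
    · -- all odd: hasEven is false
      have hlen : (a.map (fun x => PySem.Int.mod x 2)).sum = ((a.map (fun x => PySem.Int.mod x 2)).length : Int) := by
        simpa using h1
      have hall := (pv_sum_len_iff _ hcases).mp hlen
      have hne : a.any (fun x => decide (PySem.Int.mod x 2 = 0)) = false := by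
        simp only [List.any_eq_false, decide_eq_true_eq]
        intro x hx
        have := hall _ (List.mem_map.mpr ⟨x, hx, rfl⟩)
        omega
      rw [hne]; simp
  · -- mixed case
    push Not at hc
    obtain ⟨hns0, hnsl⟩ := hc
    simp only [hns0, hnsl, or_self, if_false]
    -- both parities occur
    have hodd : ∃ x ∈ a, PySem.Int.mod x 2 = 1 := by
      by_contra h
      push Not at h
      exact hns0 ((pv_sum_zero_iff _ hcases).mpr (fun x hx => by
        rcases List.mem_map.mp hx with ⟨y, hy, rfl⟩
        rcases pv_mod2_cases y with h' | h'
        · exact h'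
        · exact absurd h' (h y hy)))
    have heven : ∃ x ∈ a, PySem.Int.mod x 2 = 0 := by
      by_contra h
      push Not at h
      apply hnsl
      have : (a.map (fun x => PySem.Int.mod x 2)).sum = ((a.map (fun x => PySem.Int.mod x 2)).length : Int) := by
        apply (pv_sum_len_iff _ hcases).mpr
        intro x hx
        rcases List.mem_map.mp hx with ⟨y, hy, rfl⟩
        rcases pv_mod2_cases y with h' | h'
        · exact absurd h' (h y hy)
        · exact h'
      simpa using this
    obtain ⟨xo, hxo, hxo2⟩ := hodd
    obtain ⟨xe, hxe, hxe2⟩ := heven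
    have hhasOdd : a.any (fun x => decide (PySem.Int.mod x 2 ≠ 0)) = true := by
      simp only [List.any_eq_true, decide_eq_true_eq]
      exact ⟨xo, hxo, by omega⟩
    have hhasEven : a.any (fun x => decide (PySem.Int.mod x 2 = 0)) = true := by
      simp only [List.any_eq_true, decide_eq_true_eq]
      exact ⟨xe, hxe, hxe2⟩
    rw [hhasOdd, hhasEven]
    simp only [Bool.not_true, Bool.or_self, Bool.false_eq_true, if_false]
    have hane : a ≠ [] := by intro h; subst h; simp at hxo
    obtain ⟨m, hm⟩ : ∃ m, PySem.List.min? a (fun x => x) = some m := by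
      cases h : PySem.List.min? a (fun x => x) with
      | none => exact absurd ((PySem.List.min?_eq_none_iff _ _).mp h) hane
      | some m => exact ⟨m, rfl⟩
    rw [hm]
    show (if PySem.Int.mod m 2 = 1 then true else false) = _
    have hmmem := PySem.List.min?_mem hm
    have hmmin := PySem.List.min?_isMin hm
    rcases pv_mod2_cases m with hm2 | hm2
    · -- minimum even: A returns false; B's any is false (no odd x can be below the even minimum m)
      have hne1 : PySem.Int.mod m 2 ≠ 1 := by omega
      rw [if_neg hne1]
      symm
      simp only [List.any_eq_false, Bool.and_eq_true, List.all_eq_true, decide_eq_true_eq,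
        Bool.or_eq_true, Bool.not_eq_true', decide_eq_false_iff_not]
      intro x hx ⟨hx2, hallx⟩
      rcases hallx m hmmem with h' | h'
      · exact h' hm2
      · exact absurd (hmmin x hx) (by omega)
    · -- minimum odd: A returns true; the witness x := m makes B's any true
      rw [if_pos hm2]
      symm
      simp only [List.any_eq_true, Bool.and_eq_true, List.all_eq_true, decide_eq_true_eq,
        Bool.or_eq_true, Bool.not_eq_true', decide_eq_false_iff_not]
      refine ⟨m, hmmem, by omega, fun y hy => ?_⟩
      rcases pv_mod2_cases y with hy2 | hy2
      · right
        have := hmmin y hy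
        rcases lt_or_eq_of_le this with h' | h'
        · exact h'
        · subst h'; omega
      · left; omega

-- ===== VERDICT (by name: the statement is the Claim_ definition above) =====
theorem equalize_parity_spec : Claim_equal_equalize_parity := by
  intro a _
  exact equalize_parity_eq a
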